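-- pv_equiv track=rewrite | github.com/rightthumb/rightthumb-widgets-v0 | widgets/python/document-content-deep-dive.py | find_emails_basic_loop
-- ===== SOURCE A (Python) =====
-- def find_emails_basic_loop(text):
-- 	emails = []
-- 	email = ''
-- 	for char in text:
-- 		if char.isalnum() or char in ['@', '.', '_', '-']:
-- 			email += char
-- 		elif email and '@' in email and '.' in email:
-- 			emails.append(email)
-- 			email = ''
-- 		else:
-- 			email = ''
-- 	if email and '@' in email and '.' in email:
-- 		emails.append(email)
-- 	return emails
-- ===== SOURCE B (Python) =====
-- def find_emails_basic_loop(text):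
--     # Two-phase: extract maximal runs of email characters, then filter candidates.
--     def ok(c):
--         return c.isalnum() or c in '@._-'
--     tokens = []
--     i, n = 0, len(text)
--     while i < n:
--         if ok(text[i]):
--             j = i + 1
--             while j < n and ok(text[j]):
--                 j += 1
--             tokens.append(text[i:j])
--             i = j
--         else:
--             i += 1
--     return [t for t in tokens if '@' in t and '.' in t]
-- ===== Notes on version B (the rewrite author's own statement) =====
-- stated objective: alternative
-- what changed: Replaces A's single-pass accumulate-and-flush state machine (flush logic interleaved with character classification) by a two-phase structure: first extract the maximal runs of email characters as tokens via an index/slice scan, then filter the tokens that contain both '@' and '.'.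
import Mathlib
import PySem

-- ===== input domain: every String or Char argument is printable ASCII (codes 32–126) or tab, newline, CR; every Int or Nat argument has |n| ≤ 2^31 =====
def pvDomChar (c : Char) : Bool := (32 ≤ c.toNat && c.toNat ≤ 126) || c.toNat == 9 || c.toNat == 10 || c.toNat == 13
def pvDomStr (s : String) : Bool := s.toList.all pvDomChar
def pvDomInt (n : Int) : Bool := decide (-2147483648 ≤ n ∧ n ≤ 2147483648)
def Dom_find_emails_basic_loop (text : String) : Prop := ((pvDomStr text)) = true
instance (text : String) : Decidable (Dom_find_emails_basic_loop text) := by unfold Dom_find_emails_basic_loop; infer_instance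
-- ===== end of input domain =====

-- B replaces A's interleaved accumulate-and-flush state machine by a two-phase
-- tokenize-then-filter structure (extract maximal runs, then filter); objective: alternative.


-- char.isalnum() or char in ['@', '.', '_', '-']   (shared character class of both Pythons)
def pvOk (c : Char) : Bool := PySem.Chars.isalnum c || ['@', '.', '_', '-'].contains c

-- '@' in e and '.' in e  (single-char substring test; PySem.Chars.isIn is Python's 'in')
def pvGood (e : List Char) : Bool := PySem.Chars.isIn ['@'] e && PySem.Chars.isIn ['.'] e

-- ===== PORT A =====
-- A's loop body: the three branches of the if/elif/else, on the state (emails, email)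
def pvStep (st : List String × List Char) (c : Char) : List String × List Char :=
  if pvOk c then (st.1, st.2 ++ [c])
  else if (!st.2.isEmpty) && pvGood st.2 then (st.1 ++ [String.mk st.2], [])
  else (st.1, [])

-- A's trailing flush after the loop
def pvFinish (r : List String × List Char) : List String :=
  if (!r.2.isEmpty) && pvGood r.2 then r.1 ++ [String.mk r.2] else r.1

def find_emails_basic_loop (text : String) : List String :=
  pvFinish (text.toList.foldl pvStep ([], []))

-- ===== PORT B =====
-- B's outer while loop: each maximal run (inner while = takeWhile/dropWhile) becomes a token.
def pvTokens : List Char → List (List Char)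
  | [] => []
  | c :: cs =>
    if pvOk c then (c :: cs.takeWhile pvOk) :: pvTokens (cs.dropWhile pvOk)
    else pvTokens cs
termination_by cs => cs.length
decreasing_by
  · exact Nat.lt_succ_of_le (cs.dropWhile_sublist pvOk).length_le
  · exact Nat.lt_succ_of_le (Nat.le_refl _)

def find_emails_basic_loop_alt (text : String) : List String :=
  ((pvTokens text.toList).filter pvGood).map String.mk

-- ===== PRECONDITION & SPEC =====
def Spec_find_emails_basic_loop (text : String) (out : List String) : Prop := out = find_emails_basic_loop_alt text
instance (text : String) (out : List String) : Decidable (Spec_find_emails_basic_loop text out) := by unfold Spec_find_emails_basic_loop; infer_instance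

-- ===== CLAIM (what is proved, stated in full; the proofs are below) =====
def Claim_equal_find_emails_basic_loop : Prop := ∀ (text : String), Dom_find_emails_basic_loop text → Spec_find_emails_basic_loop text (find_emails_basic_loop text)

-- ===== LEMMAS AND PROOFS =====

-- the tokens A's loop will still emit, given the current accumulator `email`
def pvEmit (email : List Char) : List Char → List (List Char)
  | [] => if (!email.isEmpty) && pvGood email then [email] else []
  | c :: cs =>
    if pvOk c then pvEmit (email ++ [c]) cs
    else (if (!email.isEmpty) && pvGood email then [email] else []) ++ pvEmit [] cs

theorem pvFlush_eq_good (e : List Char) : ((!e.isEmpty) && pvGood e) = pvGood e := by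
  cases e with
  | nil => decide
  | cons a l => simp [List.isEmpty]

theorem pvFoldl_eq_emit : ∀ (cs : List Char) (emails : List String) (email : List Char),
    pvFinish (cs.foldl pvStep (emails, email)) = emails ++ (pvEmit email cs).map String.mk
  | [], emails, email => by
    simp only [List.foldl_nil, pvFinish, pvEmit]
    cases hf : ((!email.isEmpty) && pvGood email) <;> simp
  | c :: cs, emails, email => by
    rw [List.foldl_cons, pvEmit]
    cases h : pvOk c with
    | true =>
      simp only [pvStep, h, if_true]
      rw [pvFoldl_eq_emit cs emails (email ++ [c])]
    | false =>
      cases hf : ((!email.isEmpty) && pvGood email) with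
      | true =>
        simp only [pvStep, h, hf, Bool.false_eq_true, if_false, if_true]
        rw [pvFoldl_eq_emit cs (emails ++ [String.mk email]) []]
        simp
      | false =>
        simp only [pvStep, h, hf, Bool.false_eq_true, if_false]
        rw [pvFoldl_eq_emit cs emails []]
        simp

theorem pvEmit_eq_tokens : ∀ (cs : List Char),
    (pvEmit [] cs = (pvTokens cs).filter pvGood) ∧
    (∀ email : List Char, email ≠ [] →
      pvEmit email cs
        = (((email ++ cs.takeWhile pvOk) :: pvTokens (cs.dropWhile pvOk)).filter pvGood))
  | [] => by
    constructor
    · simp [pvEmit, pvTokens]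
    · intro email _
      rw [pvEmit, pvFlush_eq_good]
      have ht0 : pvTokens [] = [] := by rw [pvTokens.eq_def]
      cases hg : pvGood email <;> simp [List.filter, hg, ht0]
  | c :: cs => by
    obtain ⟨iha, ihb⟩ := pvEmit_eq_tokens cs
    cases h : pvOk c with
    | true =>
      constructor
      · rw [pvEmit, pvTokens]
        simp only [h, if_true]
        have hb := ihb [c] (by simp)
        simp only [List.nil_append]
        rw [hb]
        simp
      · intro email hne
        rw [pvEmit]
        simp only [h, if_true, List.takeWhile_cons, List.dropWhile_cons]
        rw [ihb (email ++ [c]) (by simp)]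
        simp
    | false =>
      have ht : pvTokens (c :: cs) = pvTokens cs := by
        rw [pvTokens]; simp [h]
      constructor
      · rw [pvEmit, ht]
        simp [h, iha]
      · intro email hne
        rw [pvEmit]
        simp only [h, Bool.false_eq_true, if_false, List.takeWhile_cons, List.dropWhile_cons, ht]
        simp only [List.append_nil]
        rw [iha, pvFlush_eq_good]
        cases hg : pvGood email <;> simp [List.filter, hg]

-- ===== VERDICT (by name: the statement is the Claim_ definition above) =====
theorem find_emails_basic_loop_spec : Claim_equal_find_emails_basic_loop := by
  intro text _
  show find_emails_basic_loop text = find_emails_basic_loop_alt text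
  unfold find_emails_basic_loop find_emails_basic_loop_alt
  rw [pvFoldl_eq_emit text.toList [] [], (pvEmit_eq_tokens text.toList).1]
  simp
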